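-- pv_equiv track=rewrite | github.com/t1anchen/ml-dojo | nlp100/2020/chap03.py | double_ends
-- ===== SOURCE A (Python) =====
-- from typing import Generator, Iterable, Match, Optional, TypeVar
--
-- T = TypeVar("T")
--
-- def double_ends(stream: Iterable[T]) -> tuple[Optional[T], Optional[T]]:
--     first_elem, last_elem = None, None
--     for x in stream:
--         first_elem = x
--         last_elem = x
--         break
--     for x in stream:
--         last_elem = x
--     return first_elem, last_elem
-- ===== SOURCE B (Python) =====
-- def double_ends(stream):
--     items = list(stream)
--     if not items:
--         return (None, None)
--     return (items[0], items[-1])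
-- ===== Notes on version B (the rewrite author's own statement) =====
-- stated objective: simpler
-- what changed: B materializes the iterable into a list once and indexes its ends directly, replacing A's two explicit streaming loops (break-for-first, tail loop for last).
import Mathlib
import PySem

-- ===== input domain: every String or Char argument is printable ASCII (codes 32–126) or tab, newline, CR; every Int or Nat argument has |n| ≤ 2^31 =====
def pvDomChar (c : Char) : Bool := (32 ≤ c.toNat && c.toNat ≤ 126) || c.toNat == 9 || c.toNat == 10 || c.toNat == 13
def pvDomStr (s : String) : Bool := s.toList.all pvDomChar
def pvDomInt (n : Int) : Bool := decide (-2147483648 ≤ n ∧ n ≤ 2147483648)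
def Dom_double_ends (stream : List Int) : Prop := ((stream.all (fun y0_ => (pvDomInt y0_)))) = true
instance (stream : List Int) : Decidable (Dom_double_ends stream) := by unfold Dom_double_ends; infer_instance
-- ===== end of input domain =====

-- B materializes the list and indexes both ends directly instead of A's two streaming loops; objective: simpler.


-- ===== PORT A =====
-- first loop with break: take the head (if any) as both first_elem and last_elem;
-- second loop: fold over the whole list (re-iterating a list restarts), overwriting last_elem.
def double_ends (stream : List Int) : Option Int × Option Int :=
  let fl : Option Int × Option Int :=
    match stream with
    | [] => (none, none)
    | x :: _ => (some x, some x)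
  let last_elem := stream.foldl (fun _ x => some x) fl.2
  (fl.1, last_elem)

-- ===== PORT B =====
-- items = list(stream); empty → (None, None); else (items[0], items[-1]).
def double_ends_alt (stream : List Int) : Option Int × Option Int :=
  let items := stream
  if items.isEmpty then (none, none)
  else (PySem.List.pyGet? items 0, PySem.List.pyGet? items (-1))

-- ===== PRECONDITION & SPEC =====
def Spec_double_ends (stream : List Int) (out : Option Int × Option Int) : Prop := out = double_ends_alt stream
instance (stream : List Int) (out : Option Int × Option Int) : Decidable (Spec_double_ends stream out) := by unfold Spec_double_ends; infer_instance

-- ===== CLAIM (what is proved, stated in full; the proofs are below) =====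
def Claim_equal_double_ends : Prop := ∀ (stream : List Int), Dom_double_ends stream → Spec_double_ends stream (double_ends stream)

-- ===== LEMMAS AND PROOFS =====
theorem foldl_keep_last (xs : List Int) (a : Int) :
    xs.foldl (fun _ x => (some x : Option Int)) (some a) = some (xs.getLastD a) := by
  induction xs generalizing a with
  | nil => rfl
  | cons y ys ih => simp only [List.foldl]; rw [ih, List.getLastD_cons]

theorem pyGet?_neg_one (x : Int) (xs : List Int) :
    PySem.List.pyGet? (x :: xs) (-1) = some ((x :: xs).getLastD 0) := by
  simp [PySem.List.pyGet?, PySem.List.pyIdx?]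
  rw [List.getLast?_eq_some_getLast (by simp), List.getLast_eq_getElem]
  congr 1

-- ===== VERDICT (by name: the statement is the Claim_ definition above) =====
theorem double_ends_spec : Claim_equal_double_ends := by
  intro stream _
  unfold Spec_double_ends double_ends double_ends_alt
  cases stream with
  | nil => rfl
  | cons x xs =>
    simp only [List.foldl, foldl_keep_last, pyGet?_neg_one, List.getLastD_cons,
      List.isEmpty_cons, Bool.false_eq_true, if_false]
    simp [PySem.List.pyGet?, PySem.List.pyIdx?]
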